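-- pv_equiv track=rewrite | github.com/MRU-COMP1501/w22-lecture-supplement | lecture16/slide_10.py | swap_adjacent
-- ===== SOURCE A (Python) =====
-- def swap_adjacent(some_nums):
--     # comment out the next line to see it modified in place
--     some_nums = some_nums.copy()
--     for i in range(1, len(some_nums)):
--         prev = some_nums[i - 1]
--         if prev < some_nums[i]:
--             some_nums[i - 1] = some_nums[i]
--             some_nums[i] = prev
--     return some_nums
-- ===== SOURCE B (Python) =====
-- def swap_adjacent(some_nums):
--     # Closed-form characterization of A's pass: position i holds
--     # max(min(some_nums[0..i]), some_nums[i+1]); the last position holds the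
--     # global minimum. Computed as staged passes: prefix minima, then zip.
--     if not some_nums:
--         return []
--     pmin = []
--     m = some_nums[0]
--     for x in some_nums:
--         m = min(m, x)
--         pmin.append(m)
--     return [max(p, x) for p, x in zip(pmin, some_nums[1:])] + [m]
-- ===== Notes on version B (the rewrite author's own statement) =====
-- stated objective: alternative
-- what changed: Replaces A's in-place adjacent-swap pass by its closed form: compute the prefix minima in a first pass, then output max(prefix_min, next element) pairwise with the global minimum appended last.
import Mathlib
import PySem

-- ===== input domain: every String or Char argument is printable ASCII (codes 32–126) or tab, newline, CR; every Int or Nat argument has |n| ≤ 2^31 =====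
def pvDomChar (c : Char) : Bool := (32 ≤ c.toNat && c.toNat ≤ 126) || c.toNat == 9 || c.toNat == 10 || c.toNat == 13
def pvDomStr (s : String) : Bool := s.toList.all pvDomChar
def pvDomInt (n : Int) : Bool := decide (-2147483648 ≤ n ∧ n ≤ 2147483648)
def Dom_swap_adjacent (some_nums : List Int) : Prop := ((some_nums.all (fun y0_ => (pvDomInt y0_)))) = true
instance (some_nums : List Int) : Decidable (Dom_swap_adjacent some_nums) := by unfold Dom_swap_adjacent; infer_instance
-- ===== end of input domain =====

-- B replaces A's in-place adjacent-swap pass by its closed form: prefix minima first, then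
-- pairwise max with the next element and the global minimum appended; same O(n) cost.

-- ===== PORT A =====
-- one step of A's loop body at index i: prev = l[i-1] (inlined), cur = l[i]; indices i-1, i are
-- always in range, so the getD defaults are never used
def swapStep (l : List Int) (i : Nat) : List Int :=
  if l.getD (i - 1) 0 < l.getD i 0 then (l.set (i - 1) (l.getD i 0)).set i (l.getD (i - 1) 0) else l

-- for i in range(1, len(some_nums)): … on a copy of the list
def swap_adjacent (some_nums : List Int) : List Int :=
  (List.range' 1 (some_nums.length - 1)).foldl swapStep some_nums

-- ===== PORT B =====
-- the loop 'for x in some_nums: m = min(m, x); pmin.append(m)', split into the list it builds …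
def pminList (m : Int) : List Int → List Int
  | [] => []
  | y :: rest => min m y :: pminList (min m y) rest

-- … and the final value of m after that loop
def lastMin (m : Int) : List Int → Int
  | [] => m
  | y :: rest => lastMin (min m y) rest

-- '[max(p, x) for p, x in zip(pmin, some_nums[1:])] + [m]'
def swap_adjacent_alt (some_nums : List Int) : List Int :=
  match some_nums with
  | [] => []
  | x :: rest =>
    List.zipWith (fun p y => max p y) (pminList x (x :: rest)) rest ++ [lastMin x (x :: rest)]

-- ===== PRECONDITION & SPEC =====
def Spec_swap_adjacent (some_nums : List Int) (out : List Int) : Prop := out = swap_adjacent_alt some_nums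
instance (some_nums : List Int) (out : List Int) : Decidable (Spec_swap_adjacent some_nums out) := by unfold Spec_swap_adjacent; infer_instance

-- ===== CLAIM (what is proved, stated in full; the proofs are below) =====
def Claim_equal_swap_adjacent : Prop := ∀ (some_nums : List Int), Dom_swap_adjacent some_nums → Spec_swap_adjacent some_nums (swap_adjacent some_nums)

-- ===== LEMMAS AND PROOFS =====

-- proof-side intermediate form: one pass threading the carried minimum
def swapCarry (carry : Int) : List Int → List Int
  | [] => [carry]
  | x :: rest => if carry < x then x :: swapCarry carry rest else carry :: swapCarry x rest

theorem set_append_len (acc : List Int) (c : Int) (t : List Int) (v : Int) :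
    (acc ++ c :: t).set acc.length v = acc ++ v :: t := by
  induction acc with
  | nil => rfl
  | cons a as ih => simp [ih]

theorem foldl_swapStep (rest : List Int) (acc : List Int) (carry : Int) :
    (List.range' (acc.length + 1) rest.length).foldl swapStep (acc ++ carry :: rest)
      = acc ++ swapCarry carry rest := by
  induction rest generalizing acc carry with
  | nil => simp [swapCarry]
  | cons x rs ih =>
    have h1 : (acc ++ carry :: x :: rs).getD (acc.length + 1 - 1) 0 = carry := by
      simp
    have h2 : (acc ++ carry :: x :: rs).getD (acc.length + 1) 0 = x := by
      simp
    have hstep : swapStep (acc ++ carry :: x :: rs) (acc.length + 1)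
        = if carry < x then acc ++ x :: carry :: rs else acc ++ carry :: x :: rs := by
      unfold swapStep
      rw [h1, h2]
      split_ifs with h
      · have hs1 : (acc ++ carry :: x :: rs).set (acc.length + 1 - 1) x = acc ++ x :: x :: rs := by
          simp [set_append_len acc carry (x :: rs) x]
        rw [hs1]
        have hs2 := set_append_len (acc ++ [x]) x rs carry
        rw [show acc ++ x :: x :: rs = (acc ++ [x]) ++ x :: rs by simp,
            show acc ++ x :: carry :: rs = (acc ++ [x]) ++ carry :: rs by simp,
            show acc.length + 1 = (acc ++ [x]).length by simp]
        exact hs2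
      · rfl
    rw [show (x :: rs).length = rs.length + 1 from rfl, List.range'_succ, List.foldl_cons, hstep]
    by_cases h : carry < x
    · rw [if_pos h]
      have := ih (acc ++ [x]) carry
      simpa [List.append_assoc, swapCarry, if_pos h, Nat.add_assoc] using this
    · rw [if_neg h]
      have := ih (acc ++ [carry]) x
      simpa [List.append_assoc, swapCarry, if_neg h, Nat.add_assoc] using this

theorem zip_pmin_eq_swapCarry (rest : List Int) (carry : Int) :
    List.zipWith (fun p y => max p y) (carry :: pminList carry rest) rest ++ [lastMin carry rest]
      = swapCarry carry rest := by
  induction rest generalizing carry with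
  | nil => simp [pminList, lastMin, swapCarry]
  | cons y rs ih =>
    by_cases h : carry < y
    · have hmax : max carry y = y := max_eq_right (le_of_lt h)
      have hmin : min carry y = carry := min_eq_left (le_of_lt h)
      simp [pminList, lastMin, swapCarry, hmax, hmin, h, ih]
    · have hmax : max carry y = carry := max_eq_left (le_of_not_gt (by simpa using h))
      have hmin : min carry y = y := min_eq_right (le_of_not_gt (by simpa using h))
      simp [pminList, lastMin, swapCarry, hmax, hmin, h, ih]

-- ===== VERDICT (by name: the statement is the Claim_ definition above) =====
theorem swap_adjacent_spec : Claim_equal_swap_adjacent := by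
  intro some_nums _
  unfold Spec_swap_adjacent swap_adjacent swap_adjacent_alt
  cases some_nums with
  | nil => rfl
  | cons x rest =>
    have hA := foldl_swapStep rest [] x
    have hB := zip_pmin_eq_swapCarry rest x
    simp only [pminList, min_self, lastMin] at hB ⊢
    simpa [hB] using hA
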